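-- pv_equiv track=rewrite | github.com/ucbtrans/sumo-project | examples/platoon/platoon_functions.py | get_next_segment
-- ===== SOURCE A (Python) =====
-- def get_next_segment(leader_route, road_segment):
-- 		index = 0
-- 		for segment in leader_route:
-- 				index += 1
-- 				if segment == road_segment:
-- 						break
-- 		if len(leader_route) > index:
-- 				return leader_route[index]
-- 		else:
-- 				return "destination"
-- ===== SOURCE B (Python) =====
-- def get_next_segment(leader_route, road_segment):
--     # build a successor map once (first occurrence of a segment wins),
--     # then answer by a single dictionary lookup
--     succ = {}
--     for cur, nxt in zip(leader_route, leader_route[1:]):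
--         if cur not in succ:
--             succ[cur] = nxt
--     return succ.get(road_segment, "destination")
-- ===== Notes on version B (the rewrite author's own statement) =====
-- stated objective: alternative
-- what changed: Replaces A's index-counter scan with break and a post-loop bounds check by building a first-occurrence successor dictionary from consecutive pairs and answering with one dict lookup with default 'destination'.
import Mathlib
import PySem

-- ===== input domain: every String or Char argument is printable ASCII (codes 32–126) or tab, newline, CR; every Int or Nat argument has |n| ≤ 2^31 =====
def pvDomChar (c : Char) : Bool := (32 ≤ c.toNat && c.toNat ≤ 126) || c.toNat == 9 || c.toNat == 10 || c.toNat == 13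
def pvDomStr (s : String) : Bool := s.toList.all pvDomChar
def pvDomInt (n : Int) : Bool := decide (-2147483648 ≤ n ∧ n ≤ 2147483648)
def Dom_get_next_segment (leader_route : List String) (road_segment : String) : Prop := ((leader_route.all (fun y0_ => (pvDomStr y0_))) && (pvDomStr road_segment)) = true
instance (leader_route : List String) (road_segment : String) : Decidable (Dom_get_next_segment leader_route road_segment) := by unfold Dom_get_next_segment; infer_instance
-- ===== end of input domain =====

-- B replaces A's index-counter scan + break + bounds check by building a first-occurrence
-- successor dictionary from consecutive pairs and answering with one dict lookup; same O(n) cost.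


-- ===== PORT A =====
-- the for-loop of A: index starts at 0, is incremented before the test, break keeps it
def gnsLoop (leader_route : List String) (road_segment : String) (index : Nat) : Nat :=
  match leader_route with
  | [] => index
  | segment :: rest =>
      if segment == road_segment then index + 1
      else gnsLoop rest road_segment (index + 1)

def get_next_segment (leader_route : List String) (road_segment : String) : String :=
  let index := gnsLoop leader_route road_segment 0
  if leader_route.length > index then
    -- Python index here is nonnegative and in range, so pyGet? is some; getD is never the default
    (PySem.List.pyGet? leader_route (index : Int)).getD "destination"
  else
    "destination"

-- ===== PORT B =====
-- B's loop: fill the successor dict from zip(route, route[1:]), first occurrence wins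
def gnsBuild (pairs : List (String × String)) (succ : PySem.Dict String String) :
    PySem.Dict String String :=
  match pairs with
  | [] => succ
  | (cur, nxt) :: rest =>
      if succ.contains cur then gnsBuild rest succ
      else gnsBuild rest (succ.insert cur nxt)

def get_next_segment_alt (leader_route : List String) (road_segment : String) : String :=
  -- leader_route[1:] on a list = drop 1 (exact: slice with start 1, no stop)
  (gnsBuild (leader_route.zip (leader_route.drop 1)) PySem.Dict.empty).getD road_segment "destination"

-- ===== PRECONDITION & SPEC =====
def Spec_get_next_segment (leader_route : List String) (road_segment : String) (out : String) : Prop := out = get_next_segment_alt leader_route road_segment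
instance (leader_route : List String) (road_segment : String) (out : String) : Decidable (Spec_get_next_segment leader_route road_segment out) := by unfold Spec_get_next_segment; infer_instance

-- ===== CLAIM (what is proved, stated in full; the proofs are below) =====
def Claim_equal_get_next_segment : Prop := ∀ (leader_route : List String) (road_segment : String), Dom_get_next_segment leader_route road_segment → Spec_get_next_segment leader_route road_segment (get_next_segment leader_route road_segment)

-- ===== LEMMAS AND PROOFS =====

-- first match in the pair list: characterisation of the built dict's lookup
def firstSucc (pairs : List (String × String)) (r : String) : String :=
  match pairs with
  | [] => "destination"
  | (cur, nxt) :: rest => if cur == r then nxt else firstSucc rest r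

theorem gnsBuild_lookup (pairs : List (String × String)) (d : PySem.Dict String String)
    (r : String) :
    (gnsBuild pairs d).getD r "destination" =
      if d.contains r then d.getD r "destination" else firstSucc pairs r := by
  induction pairs generalizing d with
  | nil =>
      by_cases h : d.contains r = true
      · simp [gnsBuild, h]
      · have hf : d.contains r = false := by simpa using h
        simp [gnsBuild, firstSucc, PySem.Dict.getD_of_not_contains d "destination" hf]
  | cons p rest ih =>
      obtain ⟨c, n⟩ := p
      by_cases hc : d.contains c = true
      · rw [show gnsBuild ((c, n) :: rest) d = gnsBuild rest d from by simp [gnsBuild, hc], ih]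
        by_cases hr : (c == r) = true
        · have : d.contains r = true := by rwa [eq_of_beq hr] at hc
          simp [this]
        · simp [firstSucc, hr]
      · have hb : d.contains c = false := by simpa using hc
        rw [show gnsBuild ((c, n) :: rest) d = gnsBuild rest (d.insert c n) from by
          simp [gnsBuild, hb], ih]
        rw [PySem.Dict.contains_insert, PySem.Dict.getD_insert]
        by_cases hr : r = c
        · subst hr
          simp [firstSucc, hb]
        · simp [firstSucc, hr, Ne.symm hr, beq_iff_eq]

-- B's result is the first-match scan over the consecutive pairs
theorem alt_eq_firstSucc (l : List String) (r : String) :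
    get_next_segment_alt l r = firstSucc (l.zip (l.drop 1)) r := by
  unfold get_next_segment_alt
  rw [gnsBuild_lookup]
  simp [PySem.Dict.contains, PySem.Dict.empty]

-- the loop counter is an accumulator: shifting the start shifts the result
theorem gnsLoop_shift (l : List String) (r : String) (i : Nat) :
    gnsLoop l r i = gnsLoop l r 0 + i := by
  induction l generalizing i with
  | nil => simp [gnsLoop]
  | cons s rest ih =>
      by_cases h : (s == r) = true <;>
        simp [gnsLoop, h, ih (i + 1), ih 1] <;> omega

theorem gns_eq (l : List String) (r : String) :
    get_next_segment l r = get_next_segment_alt l r := by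
  rw [alt_eq_firstSucc]
  induction l with
  | nil => simp [get_next_segment, gnsLoop, firstSucc]
  | cons s rest ih =>
      by_cases h : (s == r) = true
      · cases rest with
        | nil => simp [get_next_segment, gnsLoop, firstSucc, h]
        | cons t rest' =>
            simp [get_next_segment, gnsLoop, firstSucc, h,
              PySem.List.pyGet?, PySem.List.pyIdx?]
      · cases rest with
        | nil => simp [get_next_segment, gnsLoop, firstSucc, h]
        | cons t rest' =>
            have hstep : gnsLoop (s :: t :: rest') r 0 = gnsLoop (t :: rest') r 0 + 1 := by
              rw [show gnsLoop (s :: t :: rest') r 0 = gnsLoop (t :: rest') r 1 from by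
                simp [gnsLoop, h], gnsLoop_shift]
            have hA : get_next_segment (s :: t :: rest') r = get_next_segment (t :: rest') r := by
              simp only [get_next_segment]
              rw [hstep]
              set k := gnsLoop (t :: rest') r 0 with hk
              have hk1 : k ≥ 1 := by
                rw [hk]; cases h2 : (t == r) <;> simp [gnsLoop, h2, gnsLoop_shift rest' r 1]
              by_cases hlt : (t :: rest').length > k
              · have h1 : (s :: t :: rest').length > k + 1 := by simp at hlt ⊢; omega
                simp only [if_pos h1, if_pos hlt]
                congr 1
                have : PySem.List.pyGet? (s :: t :: rest') ((k + 1 : Nat) : Int)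
                    = PySem.List.pyGet? (t :: rest') ((k : Nat) : Int) := by
                  simp [PySem.List.pyGet?_natCast]
                exact_mod_cast this
              · have h1 : ¬ (s :: t :: rest').length > k + 1 := by
                  simp at hlt ⊢; omega
                simp only [if_neg h1, if_neg hlt]
            rw [hA, ih]
            simp [firstSucc, h]

-- ===== VERDICT (by name: the statement is the Claim_ definition above) =====
theorem get_next_segment_spec : Claim_equal_get_next_segment := by
  intro l r _
  unfold Spec_get_next_segment
  exact gns_eq l r
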